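-- pv_equiv track=rewrite | github.com/zhongsurehow/rt | game_prototype/bot_player.py | get_bot_choice
-- ===== SOURCE A (Python) =====
-- from typing import Dict, Any
-- from typing import Dict, Any
--
-- def get_bot_choice(valid_actions: Dict[int, Dict[str, Any]]) -> int:
--     """
--     A very simple bot logic.
--     It will choose the first available action that is not 'pass'.
--     If 'pass' is the only option, it will choose that.
--     """
--     # Find the first non-pass action
--     for key, action_data in valid_actions.items():
--         if action_data["action"] != "pass":
--             return key
--
--     # If only "pass" is available, find its key and return it
--     for key, action_data in valid_actions.items():
--         if action_data["action"] == "pass":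
--             return key
--
--     # Fallback, should not be reached if "pass" is always an option
--     return 1
-- ===== SOURCE B (Python) =====
-- def get_bot_choice(valid_actions):
--     """
--     Single pass: remember the first key seen as fallback; return the first
--     key whose action is not 'pass', else the fallback, else 1.
--     """
--     fallback = None
--     for key, action_data in valid_actions.items():
--         if fallback is None:
--             fallback = key
--         if action_data["action"] != "pass":
--             return key
--     return fallback if fallback is not None else 1
-- ===== Notes on version B (the rewrite author's own statement) =====
-- stated objective: simpler
-- what changed: One traversal with a first-key fallback accumulator replaces A's two sequential scans (first-non-pass scan plus a second first-pass scan).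
import Mathlib
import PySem

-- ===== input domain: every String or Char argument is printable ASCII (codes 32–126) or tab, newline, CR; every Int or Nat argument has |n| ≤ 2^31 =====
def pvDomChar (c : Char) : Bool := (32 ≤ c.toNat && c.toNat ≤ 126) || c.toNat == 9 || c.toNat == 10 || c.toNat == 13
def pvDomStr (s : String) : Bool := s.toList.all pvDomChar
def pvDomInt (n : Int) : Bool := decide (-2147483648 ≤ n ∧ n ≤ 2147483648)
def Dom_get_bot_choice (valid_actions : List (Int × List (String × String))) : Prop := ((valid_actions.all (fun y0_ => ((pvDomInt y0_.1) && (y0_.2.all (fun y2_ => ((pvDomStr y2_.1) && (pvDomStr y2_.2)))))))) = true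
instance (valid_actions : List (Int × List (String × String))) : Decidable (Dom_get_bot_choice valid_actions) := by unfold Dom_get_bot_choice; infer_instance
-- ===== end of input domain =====

-- B folds A's two scans (first-non-pass scan, then a first-pass scan) into ONE traversal
-- carrying a first-key fallback accumulator; return value only, no side effects.

-- action_data["action"]: first-match dict lookup; "" stands for the KeyError case, which
-- Pre_get_bot_choice excludes (exact where the lookup is actually reached).
def pvAction (d : List (String × String)) : String :=
  (PySem.Dict.mk d).getD "action" ""

-- ===== PORT A =====
-- first loop of A: first key whose action != "pass"
def pvFindNonPass : List (Int × List (String × String)) → Option Int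
  | [] => none
  | (k, d) :: rest => if pvAction d ≠ "pass" then some k else pvFindNonPass rest

-- second loop of A: first key whose action == "pass"
def pvFindPass : List (Int × List (String × String)) → Option Int
  | [] => none
  | (k, d) :: rest => if pvAction d = "pass" then some k else pvFindPass rest

def get_bot_choice (valid_actions : List (Int × List (String × String))) : Int :=
  match pvFindNonPass valid_actions with
  | some k => k
  | none =>
    match pvFindPass valid_actions with
    | some k => k
    | none => 1

-- ===== PORT B =====
-- single pass with a fallback accumulator (None = no key seen yet)
def pvScan (fallback : Option Int) : List (Int × List (String × String)) → Int
  | [] => fallback.getD 1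
  | (k, d) :: rest =>
    let fb := if fallback.isNone then some k else fallback
    if pvAction d ≠ "pass" then k else pvScan fb rest

def get_bot_choice_alt (valid_actions : List (Int × List (String × String))) : Int :=
  pvScan none valid_actions

-- ===== PRECONDITION & SPEC =====
-- Pre_ excludes exactly the inputs on which Python A raises KeyError: the scan reaches
-- (no earlier non-pass action) an entry whose inner dict lacks the "action" key.
def Pre_get_bot_choice (valid_actions : List (Int × List (String × String))) : Prop :=
  ∀ i < valid_actions.length,
    (PySem.Dict.mk (valid_actions.getD i (0, [])).2).get? "action" = none →
      ∃ j < i, PySem.Dict.getD (PySem.Dict.mk (valid_actions.getD j (0, [])).2) "action" "pass" ≠ "pass"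
instance (valid_actions : List (Int × List (String × String))) : Decidable (Pre_get_bot_choice valid_actions) := by unfold Pre_get_bot_choice; infer_instance

def pvWitness_get_bot_choice : (List (Int × List (String × String))) :=
  [(2, [("action", "pass")]), (5, [("action", "move")])]

def Spec_get_bot_choice (valid_actions : List (Int × List (String × String))) (out : Int) : Prop := out = get_bot_choice_alt valid_actions
instance (valid_actions : List (Int × List (String × String))) (out : Int) : Decidable (Spec_get_bot_choice valid_actions out) := by unfold Spec_get_bot_choice; infer_instance

-- ===== CLAIM (what is proved, stated in full; the proofs are below) =====
def Claim_equal_get_bot_choice : Prop := ∀ (valid_actions : List (Int × List (String × String))), Dom_get_bot_choice valid_actions → Pre_get_bot_choice valid_actions → Spec_get_bot_choice valid_actions (get_bot_choice valid_actions)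

-- ===== LEMMAS AND PROOFS =====

-- once the fallback is set it is never overwritten; if no non-pass action exists it is returned
theorem pvScan_some_of_none (va : List (Int × List (String × String))) (f : Int)
    (h : pvFindNonPass va = none) : pvScan (some f) va = f := by
  induction va with
  | nil => rfl
  | cons hd tl ih =>
    obtain ⟨k, d⟩ := hd
    simp only [pvFindNonPass] at h
    by_cases hc : pvAction d ≠ "pass"
    · simp [hc] at h
    · rw [if_neg hc] at h
      simp only [pvScan, Option.isNone_some, Bool.false_eq_true, if_false]
      rw [if_neg hc]
      exact ih h

-- a non-pass action short-circuits the scan regardless of the fallback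
theorem pvScan_of_some (va : List (Int × List (String × String))) (k : Int)
    (h : pvFindNonPass va = some k) (fb : Option Int) : pvScan fb va = k := by
  induction va generalizing fb with
  | nil => simp [pvFindNonPass] at h
  | cons hd tl ih =>
    obtain ⟨k', d⟩ := hd
    simp only [pvFindNonPass] at h
    simp only [pvScan]
    by_cases hc : pvAction d ≠ "pass"
    · rw [if_pos hc] at h
      rw [if_pos hc]
      exact Option.some.inj h
    · rw [if_neg hc] at h
      rw [if_neg hc]
      exact ih h _

-- the all-pass case: the fallback (= first key) is A's second-scan result
theorem pvScan_none_of_none (va : List (Int × List (String × String)))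
    (h : pvFindNonPass va = none) :
    pvScan none va = match pvFindPass va with | some k => k | none => 1 := by
  cases va with
  | nil => rfl
  | cons hd tl =>
    obtain ⟨k, d⟩ := hd
    simp only [pvFindNonPass] at h
    by_cases hc : pvAction d ≠ "pass"
    · simp [hc] at h
    · rw [if_neg hc] at h
      have hp : pvAction d = "pass" := by simpa using hc
      simp only [pvScan, pvFindPass, Option.isNone_none, if_pos, if_neg hc, if_pos hp]
      exact pvScan_some_of_none tl k h

-- ===== VERDICT (by name: the statement is the Claim_ definition above) =====
theorem get_bot_choice_spec : Claim_equal_get_bot_choice := by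
  intro va _hdom _hpre
  unfold Spec_get_bot_choice get_bot_choice get_bot_choice_alt
  cases hnp : pvFindNonPass va with
  | some k => exact (pvScan_of_some va k hnp none).symm
  | none => exact (pvScan_none_of_none va hnp).symm
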